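-- pv_equiv track=rewrite | github.com/yangzongwu/leetcode | 20200215Python-China/0748. Shortest Completing Word.py | isCompletiongWord
-- ===== SOURCE A (Python) =====
-- def isCompletiongWord(licensePlate,word):
--     word_dict={}
--     for w in word:
--         if w not in word_dict:
--             word_dict[w]=1
--         else:
--             word_dict[w]+=1
--
--     for s in licensePlate:
--         if s not in word_dict or word_dict[s]==0:
--             return False
--         word_dict[s]-=1
--     return True
-- ===== SOURCE B (Python) =====
-- def isCompletiongWord(licensePlate, word):
--     sw = sorted(word)
--     sp = sorted(licensePlate)
--     i = j = 0
--     while i < len(sw) and j < len(sp):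
--         if sw[i] == sp[j]:
--             i += 1
--             j += 1
--         elif sw[i] < sp[j]:
--             i += 1
--         else:
--             return False
--     return j == len(sp)
-- ===== Notes on version B (the rewrite author's own statement) =====
-- stated objective: alternative
-- what changed: Replaced the hash-map count-and-decrement check by sorting both strings and matching them with a single two-pointer merge pass.
import Mathlib
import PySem

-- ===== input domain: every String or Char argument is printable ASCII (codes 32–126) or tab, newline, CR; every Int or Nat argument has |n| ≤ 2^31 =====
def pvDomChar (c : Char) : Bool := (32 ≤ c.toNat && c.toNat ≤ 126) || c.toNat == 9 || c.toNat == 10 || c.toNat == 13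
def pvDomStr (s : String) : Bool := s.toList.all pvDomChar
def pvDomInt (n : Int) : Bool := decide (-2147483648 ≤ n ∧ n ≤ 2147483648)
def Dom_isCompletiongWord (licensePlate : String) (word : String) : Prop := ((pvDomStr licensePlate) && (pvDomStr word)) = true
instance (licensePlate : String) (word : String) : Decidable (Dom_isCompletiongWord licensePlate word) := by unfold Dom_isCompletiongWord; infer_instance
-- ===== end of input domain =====

-- B replaces A's hash-count-and-decrement by sorting both strings and one two-pointer merge pass (alternative algorithm, same result).

-- ===== PORT A =====
-- first loop of A: build word_dict, a character counter over `word`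
def pvBuildA : List Char → PySem.Dict Char Int → PySem.Dict Char Int
  | [], d => d
  | w :: rest, d =>
    if !(d.contains w) then pvBuildA rest (d.insert w 1)
    else pvBuildA rest (d.insert w (d.getD w 0 + 1))

-- second loop of A: consume licensePlate's characters from word_dict
def pvLoopA : List Char → PySem.Dict Char Int → Bool
  | [], _ => true
  | s :: rest, d =>
    if !(d.contains s) || (d.getD s 0 == 0) then false
    else pvLoopA rest (d.insert s (d.getD s 0 - 1))

def isCompletiongWord (licensePlate : String) (word : String) : Bool :=
  pvLoopA licensePlate.toList (pvBuildA word.toList PySem.Dict.empty)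

-- ===== PORT B =====
-- B's while-loop over indices i, j into the two sorted strings, as structural recursion on the suffixes
def pvMerge : List Char → List Char → Bool
  | _, [] => true
  | [], _ :: _ => false
  | a :: as, b :: bs =>
    if a == b then pvMerge as bs
    else if a < b then pvMerge as (b :: bs)
    else false

def isCompletiongWord_alt (licensePlate : String) (word : String) : Bool :=
  pvMerge (PySem.List.sorted word.toList (fun x => x) false)
          (PySem.List.sorted licensePlate.toList (fun x => x) false)

-- ===== PRECONDITION & SPEC =====
def Spec_isCompletiongWord (licensePlate : String) (word : String) (out : Bool) : Prop := out = isCompletiongWord_alt licensePlate word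
instance (licensePlate : String) (word : String) (out : Bool) : Decidable (Spec_isCompletiongWord licensePlate word out) := by unfold Spec_isCompletiongWord; infer_instance

-- ===== CLAIM (what is proved, stated in full; the proofs are below) =====
def Claim_equal_isCompletiongWord : Prop := ∀ (licensePlate : String) (word : String), Dom_isCompletiongWord licensePlate word → Spec_isCompletiongWord licensePlate word (isCompletiongWord licensePlate word)

-- ===== LEMMAS AND PROOFS =====

-- A's first loop counts characters
theorem pvBuildA_getD (l : List Char) (d : PySem.Dict Char Int) (c : Char) :
    (pvBuildA l d).getD c 0 = d.getD c 0 + l.count c := by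
  induction l generalizing d with
  | nil => simp [pvBuildA]
  | cons w rest ih =>
    simp only [pvBuildA]
    by_cases hw : d.contains w
    · rw [if_neg (by simp [hw]), ih, PySem.Dict.getD_insert]
      by_cases hc : c = w
      · subst hc; simp; ring
      · simp [hc, Ne.symm hc]
    · have hw' : d.contains w = false := by simpa using hw
      rw [if_pos (by simp [hw']), ih, PySem.Dict.getD_insert]
      by_cases hc : c = w
      · subst hc
        rw [if_pos rfl, PySem.Dict.getD_of_not_contains d 0 hw', List.count_cons_self]
        push_cast
        omega
      · simp [hc, Ne.symm hc]

theorem pvLoopA_iff (l : List Char) (d : PySem.Dict Char Int)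
    (hnn : ∀ c, 0 ≤ d.getD c 0) :
    (pvLoopA l d = true ↔ ∀ c, (l.count c : Int) ≤ d.getD c 0) := by
  induction l generalizing d with
  | nil =>
    simp only [pvLoopA, List.count_nil, Int.ofNat_zero, true_iff]
    intro c; simpa using hnn c
  | cons s rest ih =>
    simp only [pvLoopA]
    by_cases hz : d.getD s 0 = 0
    · rw [if_pos (by simp [hz])]
      simp only [Bool.false_eq_true, false_iff, not_forall]
      refine ⟨s, ?_⟩
      rw [hz]
      have hpos : 0 < (s :: rest).count s := by rw [List.count_cons_self]; omega
      omega
    · have hcont : d.contains s = true := by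
        by_contra h
        have h' : d.contains s = false := by simpa using h
        exact hz (PySem.Dict.getD_of_not_contains d 0 h')
      rw [if_neg (by simp [hcont, hz])]
      have hpos : 1 ≤ d.getD s 0 := by have := hnn s; omega
      have hnn' : ∀ c, 0 ≤ (d.insert s (d.getD s 0 - 1)).getD c 0 := by
        intro c
        rw [PySem.Dict.getD_insert]
        by_cases hc : c = s
        · simp [hc]; omega
        · simp [hc]; exact hnn c
      rw [ih _ hnn']
      constructor
      · intro h c
        have hcc := h c
        rw [PySem.Dict.getD_insert] at hcc
        by_cases hc : c = s
        · subst hc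
          rw [if_pos rfl] at hcc
          rw [List.count_cons_self]
          push_cast at hcc ⊢
          omega
        · rw [if_neg hc] at hcc
          have hsc : ¬ (s = c) := fun he => hc he.symm
          simpa [List.count_cons, hsc] using hcc
      · intro h c
        have hcc := h c
        rw [PySem.Dict.getD_insert]
        by_cases hc : c = s
        · subst hc
          rw [List.count_cons_self] at hcc
          rw [if_pos rfl]
          push_cast at hcc ⊢
          omega
        · rw [if_neg hc]
          have hsc : ¬ (s = c) := fun he => hc he.symm
          simpa [List.count_cons, hsc] using hcc

-- A decides multiset containment of licensePlate in word
theorem isCompletiongWord_iff (lp w : String) :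
    (isCompletiongWord lp w = true ↔ List.Subperm lp.toList w.toList) := by
  unfold isCompletiongWord
  have hnn : ∀ c, 0 ≤ (pvBuildA w.toList PySem.Dict.empty).getD c 0 := by
    intro c; rw [pvBuildA_getD]; simp
  rw [pvLoopA_iff _ _ hnn, List.subperm_ext_iff]
  constructor
  · intro h c _
    have hcc := h c
    rw [pvBuildA_getD] at hcc
    simp at hcc
    exact_mod_cast hcc
  · intro h c
    rw [pvBuildA_getD]
    simp only [PySem.Dict.getD_empty, zero_add]
    by_cases hc : c ∈ lp.toList
    · exact_mod_cast h c hc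
    · simp [List.count_eq_zero_of_not_mem hc]

-- B's merge pass decides multiset containment of sp in sw, for sorted inputs
theorem pvMerge_iff (sw sp : List Char)
    (hw : sw.Pairwise (· ≤ ·)) (hp : sp.Pairwise (· ≤ ·)) :
    (pvMerge sw sp = true ↔ List.Subperm sp sw) := by
  induction sw generalizing sp with
  | nil =>
    cases sp with
    | nil => simp [pvMerge]
    | cons b bs =>
      simp only [pvMerge, Bool.false_eq_true, false_iff]
      intro h
      simpa using h.length_le
  | cons a as ih =>
    cases sp with
    | nil => simp [pvMerge, List.nil_subperm]
    | cons b bs =>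
      rw [List.pairwise_cons] at hw hp
      simp only [pvMerge]
      by_cases hab : a = b
      · subst hab
        rw [if_pos (by simp), ih bs hw.2 hp.2]
        exact (List.subperm_cons a).symm
      · rw [if_neg (by simpa using hab)]
        by_cases hlt : a < b
        · rw [if_pos hlt, ih (b :: bs) hw.2 (List.pairwise_cons.mpr hp)]
          constructor
          · intro h
            exact h.trans (List.sublist_cons_self a as).subperm
          · intro h
            rw [List.subperm_ext_iff] at h ⊢
            intro x hx
            have hbx : b ≤ x := by
              rcases List.mem_cons.mp hx with rfl | hx'
              · exact le_refl x
              · exact hp.1 x hx'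
            have hxa : x ≠ a := by
              intro he; subst he; exact absurd hlt (not_lt.mpr hbx)
            have hcc := h x hx
            simpa [List.count_cons, Ne.symm hxa] using hcc
        · rw [if_neg hlt]
          simp only [Bool.false_eq_true, false_iff]
          intro h
          have hb : b ∈ a :: as := h.subset (by simp)
          have hba : b < a := lt_of_le_of_ne (not_lt.mp hlt) (fun he => hab he.symm)
          rcases List.mem_cons.mp hb with h' | h'
          · exact absurd h' (ne_of_lt hba)
          · exact absurd (hw.1 b h') (not_le.mpr hba)

theorem isCompletiongWord_alt_iff (lp w : String) :
    (isCompletiongWord_alt lp w = true ↔ List.Subperm lp.toList w.toList) := by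
  unfold isCompletiongWord_alt
  rw [pvMerge_iff _ _ (PySem.List.sorted_pairwise _ _) (PySem.List.sorted_pairwise _ _)]
  rw [(PySem.List.sorted_perm w.toList (fun x => x) false).subperm_left]
  rw [(PySem.List.sorted_perm lp.toList (fun x => x) false).subperm_right]

-- ===== VERDICT (by name: the statement is the Claim_ definition above) =====
theorem isCompletiongWord_spec : Claim_equal_isCompletiongWord := by
  intro lp w _
  unfold Spec_isCompletiongWord
  have h := (isCompletiongWord_iff lp w).trans (isCompletiongWord_alt_iff lp w).symm
  exact Bool.coe_iff_coe.mp h
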